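-- pv_equiv track=rewrite | github.com/Gita-Daily/Gita-Daily | app.py | getChSh
-- ===== SOURCE A (Python) =====
-- chapter_shlokas = [47, 72, 43, 42, 29, 47, 30, 28, 34, 42, 55, 20, 34, 27, 20, 24, 28, 78]
--
-- def getChSh(n):
--     ch = 1
--     for n_schlokas in chapter_shlokas:
--         if(n-n_schlokas > 0):
--             n = n - n_schlokas
--             ch = ch + 1
--         else:
--             break
--
--     return (ch, n);
-- ===== SOURCE B (Python) =====
-- chapter_shlokas = [47, 72, 43, 42, 29, 47, 30, 28, 34, 42, 55, 20, 34, 27, 20, 24, 28, 78]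
--
-- _cum = []
-- _t = 0
-- for _c in chapter_shlokas:
--     _t += _c
--     _cum.append(_t)
--
-- def getChSh(n):
--     # binary search for the first chapter whose cumulative count reaches n
--     lo, hi = 0, len(_cum)
--     while lo < hi:
--         mid = (lo + hi) // 2
--         if _cum[mid] < n:
--             lo = mid + 1
--         else:
--             hi = mid
--     base = _cum[lo - 1] if lo > 0 else 0
--     return (lo + 1, n - base)
-- ===== Notes on version B (the rewrite author's own statement) =====
-- stated objective: alternative
-- what changed: Replaced A's destructive linear subtraction scan over chapter_shlokas by a one-time cumulative prefix-sum table plus a hand-written bisect_left binary search that maps n to its chapter and offset.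
import Mathlib
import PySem

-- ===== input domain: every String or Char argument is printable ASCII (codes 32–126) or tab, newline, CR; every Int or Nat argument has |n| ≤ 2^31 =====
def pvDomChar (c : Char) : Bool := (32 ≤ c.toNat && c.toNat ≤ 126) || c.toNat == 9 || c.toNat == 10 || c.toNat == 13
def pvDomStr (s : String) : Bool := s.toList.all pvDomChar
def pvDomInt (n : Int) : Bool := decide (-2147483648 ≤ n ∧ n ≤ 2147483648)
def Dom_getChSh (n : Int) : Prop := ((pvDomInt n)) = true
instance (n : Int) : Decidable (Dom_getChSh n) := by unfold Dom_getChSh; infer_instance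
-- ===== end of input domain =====

-- B replaces A's destructive subtraction scan by a binary search over a precomputed
-- cumulative prefix-sum table (objective: alternative; identical return values, proved equal).

-- ===== PORT A =====
def chapterShlokas : List Int := [47, 72, 43, 42, 29, 47, 30, 28, 34, 42, 55, 20, 34, 27, 20, 24, 28, 78]

-- A's for-loop with break, as structural recursion over the list (state: ch, n)
def getChSh_loop : List Int → Int → Int → Int × Int
  | [], ch, n => (ch, n)
  | c :: rest, ch, n => if n - c > 0 then getChSh_loop rest (ch + 1) (n - c) else (ch, n)

def getChSh (n : Int) : Int × Int := getChSh_loop chapterShlokas 1 n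

-- ===== PORT B =====
-- Source B's module-level prefix-sum building loop
def cumShlokas : List Int :=
  (chapterShlokas.foldl (fun (acc : List Int × Int) c => (acc.1 ++ [acc.2 + c], acc.2 + c)) ([], 0)).1

-- Source B's hand-written bisect_left while-loop; the fuel argument only makes it total
-- (each step shrinks hi - lo, so fuel = length suffices; Python's loop terminates likewise)
def bisectL (a : List Int) (x : Int) : Nat → Nat → Nat → Nat
  | lo, _, 0 => lo
  | lo, hi, fuel + 1 =>
    if lo < hi then
      let mid := (lo + hi) / 2
      if a.getD mid 0 < x then bisectL a x (mid + 1) hi fuel else bisectL a x lo mid fuel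
    else lo

def getChSh_alt (n : Int) : Int × Int :=
  let lo := bisectL cumShlokas n 0 cumShlokas.length cumShlokas.length
  let base := if lo > 0 then cumShlokas.getD (lo - 1) 0 else 0
  ((lo : Int) + 1, n - base)

-- ===== PRECONDITION & SPEC =====
def Spec_getChSh (n : Int) (out : Int × Int) : Prop := out = getChSh_alt n
instance (n : Int) (out : Int × Int) : Decidable (Spec_getChSh n out) := by unfold Spec_getChSh; infer_instance

-- ===== CLAIM (what is proved, stated in full; the proofs are below) =====
def Claim_equal_getChSh : Prop := ∀ (n : Int), Dom_getChSh n → Spec_getChSh n (getChSh n)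

-- ===== LEMMAS AND PROOFS =====
-- Both ports are proved equal to one explicit piecewise function caseFn (one case per chapter);
-- A by peeling its loop interval by interval, B by evaluating the binary search on each interval.

theorem cum_eq : cumShlokas = [47,119,162,204,233,280,310,338,372,414,469,489,523,550,570,594,622,700] := by decide

def caseFn (n : Int) : Int × Int :=
  if n ≤ 47 then (1, n)
  else if n ≤ 119 then (2, n - 47)
  else if n ≤ 162 then (3, n - 119)
  else if n ≤ 204 then (4, n - 162)
  else if n ≤ 233 then (5, n - 204)
  else if n ≤ 280 then (6, n - 233)
  else if n ≤ 310 then (7, n - 280)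
  else if n ≤ 338 then (8, n - 310)
  else if n ≤ 372 then (9, n - 338)
  else if n ≤ 414 then (10, n - 372)
  else if n ≤ 469 then (11, n - 414)
  else if n ≤ 489 then (12, n - 469)
  else if n ≤ 523 then (13, n - 489)
  else if n ≤ 550 then (14, n - 523)
  else if n ≤ 570 then (15, n - 550)
  else if n ≤ 594 then (16, n - 570)
  else if n ≤ 622 then (17, n - 594)
  else if n ≤ 700 then (18, n - 622)
  else (19, n - 700)

theorem a_char (n : Int) : getChSh n = caseFn n := by
  simp only [getChSh, chapterShlokas, caseFn]
  by_cases h0 : n ≤ 47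
  · rw [getChSh_loop, if_neg (show ¬(n - 47 > 0) by omega), if_pos h0]
    try rw [Prod.mk.injEq]
    try omega
  · rw [getChSh_loop, if_pos (show n - 47 > 0 by omega), if_neg h0]
    by_cases h1 : n ≤ 119
    · rw [getChSh_loop, if_neg (show ¬(n - 47 - 72 > 0) by omega), if_pos h1]
      try rw [Prod.mk.injEq]
      try omega
    · rw [getChSh_loop, if_pos (show n - 47 - 72 > 0 by omega), if_neg h1]
      by_cases h2 : n ≤ 162
      · rw [getChSh_loop, if_neg (show ¬(n - 47 - 72 - 43 > 0) by omega), if_pos h2]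
        try rw [Prod.mk.injEq]
        try omega
      · rw [getChSh_loop, if_pos (show n - 47 - 72 - 43 > 0 by omega), if_neg h2]
        by_cases h3 : n ≤ 204
        · rw [getChSh_loop, if_neg (show ¬(n - 47 - 72 - 43 - 42 > 0) by omega), if_pos h3]
          try rw [Prod.mk.injEq]
          try omega
        · rw [getChSh_loop, if_pos (show n - 47 - 72 - 43 - 42 > 0 by omega), if_neg h3]
          by_cases h4 : n ≤ 233
          · rw [getChSh_loop, if_neg (show ¬(n - 47 - 72 - 43 - 42 - 29 > 0) by omega), if_pos h4]
            try rw [Prod.mk.injEq]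
            try omega
          · rw [getChSh_loop, if_pos (show n - 47 - 72 - 43 - 42 - 29 > 0 by omega), if_neg h4]
            by_cases h5 : n ≤ 280
            · rw [getChSh_loop, if_neg (show ¬(n - 47 - 72 - 43 - 42 - 29 - 47 > 0) by omega), if_pos h5]
              try rw [Prod.mk.injEq]
              try omega
            · rw [getChSh_loop, if_pos (show n - 47 - 72 - 43 - 42 - 29 - 47 > 0 by omega), if_neg h5]
              by_cases h6 : n ≤ 310
              · rw [getChSh_loop, if_neg (show ¬(n - 47 - 72 - 43 - 42 - 29 - 47 - 30 > 0) by omega), if_pos h6]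
                try rw [Prod.mk.injEq]
                try omega
              · rw [getChSh_loop, if_pos (show n - 47 - 72 - 43 - 42 - 29 - 47 - 30 > 0 by omega), if_neg h6]
                by_cases h7 : n ≤ 338
                · rw [getChSh_loop, if_neg (show ¬(n - 47 - 72 - 43 - 42 - 29 - 47 - 30 - 28 > 0) by omega), if_pos h7]
                  try rw [Prod.mk.injEq]
                  try omega
                · rw [getChSh_loop, if_pos (show n - 47 - 72 - 43 - 42 - 29 - 47 - 30 - 28 > 0 by omega), if_neg h7]
                  by_cases h8 : n ≤ 372
                  · rw [getChSh_loop, if_neg (show ¬(n - 47 - 72 - 43 - 42 - 29 - 47 - 30 - 28 - 34 > 0) by omega), if_pos h8]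
                    try rw [Prod.mk.injEq]
                    try omega
                  · rw [getChSh_loop, if_pos (show n - 47 - 72 - 43 - 42 - 29 - 47 - 30 - 28 - 34 > 0 by omega), if_neg h8]
                    by_cases h9 : n ≤ 414
                    · rw [getChSh_loop, if_neg (show ¬(n - 47 - 72 - 43 - 42 - 29 - 47 - 30 - 28 - 34 - 42 > 0) by omega), if_pos h9]
                      try rw [Prod.mk.injEq]
                      try omega
                    · rw [getChSh_loop, if_pos (show n - 47 - 72 - 43 - 42 - 29 - 47 - 30 - 28 - 34 - 42 > 0 by omega), if_neg h9]
                      by_cases h10 : n ≤ 469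
                      · rw [getChSh_loop, if_neg (show ¬(n - 47 - 72 - 43 - 42 - 29 - 47 - 30 - 28 - 34 - 42 - 55 > 0) by omega), if_pos h10]
                        try rw [Prod.mk.injEq]
                        try omega
                      · rw [getChSh_loop, if_pos (show n - 47 - 72 - 43 - 42 - 29 - 47 - 30 - 28 - 34 - 42 - 55 > 0 by omega), if_neg h10]
                        by_cases h11 : n ≤ 489
                        · rw [getChSh_loop, if_neg (show ¬(n - 47 - 72 - 43 - 42 - 29 - 47 - 30 - 28 - 34 - 42 - 55 - 20 > 0) by omega), if_pos h11]
                          try rw [Prod.mk.injEq]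
                          try omega
                        · rw [getChSh_loop, if_pos (show n - 47 - 72 - 43 - 42 - 29 - 47 - 30 - 28 - 34 - 42 - 55 - 20 > 0 by omega), if_neg h11]
                          by_cases h12 : n ≤ 523
                          · rw [getChSh_loop, if_neg (show ¬(n - 47 - 72 - 43 - 42 - 29 - 47 - 30 - 28 - 34 - 42 - 55 - 20 - 34 > 0) by omega), if_pos h12]
                            try rw [Prod.mk.injEq]
                            try omega
                          · rw [getChSh_loop, if_pos (show n - 47 - 72 - 43 - 42 - 29 - 47 - 30 - 28 - 34 - 42 - 55 - 20 - 34 > 0 by omega), if_neg h12]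
                            by_cases h13 : n ≤ 550
                            · rw [getChSh_loop, if_neg (show ¬(n - 47 - 72 - 43 - 42 - 29 - 47 - 30 - 28 - 34 - 42 - 55 - 20 - 34 - 27 > 0) by omega), if_pos h13]
                              try rw [Prod.mk.injEq]
                              try omega
                            · rw [getChSh_loop, if_pos (show n - 47 - 72 - 43 - 42 - 29 - 47 - 30 - 28 - 34 - 42 - 55 - 20 - 34 - 27 > 0 by omega), if_neg h13]
                              by_cases h14 : n ≤ 570
                              · rw [getChSh_loop, if_neg (show ¬(n - 47 - 72 - 43 - 42 - 29 - 47 - 30 - 28 - 34 - 42 - 55 - 20 - 34 - 27 - 20 > 0) by omega), if_pos h14]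
                                try rw [Prod.mk.injEq]
                                try omega
                              · rw [getChSh_loop, if_pos (show n - 47 - 72 - 43 - 42 - 29 - 47 - 30 - 28 - 34 - 42 - 55 - 20 - 34 - 27 - 20 > 0 by omega), if_neg h14]
                                by_cases h15 : n ≤ 594
                                · rw [getChSh_loop, if_neg (show ¬(n - 47 - 72 - 43 - 42 - 29 - 47 - 30 - 28 - 34 - 42 - 55 - 20 - 34 - 27 - 20 - 24 > 0) by omega), if_pos h15]
                                  try rw [Prod.mk.injEq]
                                  try omega
                                · rw [getChSh_loop, if_pos (show n - 47 - 72 - 43 - 42 - 29 - 47 - 30 - 28 - 34 - 42 - 55 - 20 - 34 - 27 - 20 - 24 > 0 by omega), if_neg h15]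
                                  by_cases h16 : n ≤ 622
                                  · rw [getChSh_loop, if_neg (show ¬(n - 47 - 72 - 43 - 42 - 29 - 47 - 30 - 28 - 34 - 42 - 55 - 20 - 34 - 27 - 20 - 24 - 28 > 0) by omega), if_pos h16]
                                    try rw [Prod.mk.injEq]
                                    try omega
                                  · rw [getChSh_loop, if_pos (show n - 47 - 72 - 43 - 42 - 29 - 47 - 30 - 28 - 34 - 42 - 55 - 20 - 34 - 27 - 20 - 24 - 28 > 0 by omega), if_neg h16]
                                    by_cases h17 : n ≤ 700
                                    · rw [getChSh_loop, if_neg (show ¬(n - 47 - 72 - 43 - 42 - 29 - 47 - 30 - 28 - 34 - 42 - 55 - 20 - 34 - 27 - 20 - 24 - 28 - 78 > 0) by omega), if_pos h17]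
                                      try rw [Prod.mk.injEq]
                                      try omega
                                    · rw [getChSh_loop, if_pos (show n - 47 - 72 - 43 - 42 - 29 - 47 - 30 - 28 - 34 - 42 - 55 - 20 - 34 - 27 - 20 - 24 - 28 - 78 > 0 by omega), if_neg h17]
                                      rw [getChSh_loop]
                                      try rw [Prod.mk.injEq]
                                      try omega

theorem bis_0 (n : Int) (hu : n ≤ 47) : bisectL cumShlokas n 0 18 18 = 0 := by
  rw [cum_eq]
  rw [bisectL, if_pos (by norm_num)]
  norm_num
  rw [if_neg (show ¬((414:Int) < n) by omega)]
  rw [bisectL, if_pos (by norm_num)]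
  norm_num
  rw [if_neg (show ¬((233:Int) < n) by omega)]
  rw [bisectL, if_pos (by norm_num)]
  norm_num
  rw [if_neg (show ¬((162:Int) < n) by omega)]
  rw [bisectL, if_pos (by norm_num)]
  norm_num
  rw [if_neg (show ¬((119:Int) < n) by omega)]
  rw [bisectL, if_pos (by norm_num)]
  norm_num
  rw [if_neg (show ¬((47:Int) < n) by omega)]
  rw [bisectL]
  rw [if_neg (by norm_num)]

theorem bis_1 (n : Int) (hl : 47 < n) (hu : n ≤ 119) : bisectL cumShlokas n 0 18 18 = 1 := by
  rw [cum_eq]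
  rw [bisectL, if_pos (by norm_num)]
  norm_num
  rw [if_neg (show ¬((414:Int) < n) by omega)]
  rw [bisectL, if_pos (by norm_num)]
  norm_num
  rw [if_neg (show ¬((233:Int) < n) by omega)]
  rw [bisectL, if_pos (by norm_num)]
  norm_num
  rw [if_neg (show ¬((162:Int) < n) by omega)]
  rw [bisectL, if_pos (by norm_num)]
  norm_num
  rw [if_neg (show ¬((119:Int) < n) by omega)]
  rw [bisectL, if_pos (by norm_num)]
  norm_num
  rw [if_pos (show (47:Int) < n by omega)]
  rw [bisectL]
  rw [if_neg (by norm_num)]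

theorem bis_2 (n : Int) (hl : 119 < n) (hu : n ≤ 162) : bisectL cumShlokas n 0 18 18 = 2 := by
  rw [cum_eq]
  rw [bisectL, if_pos (by norm_num)]
  norm_num
  rw [if_neg (show ¬((414:Int) < n) by omega)]
  rw [bisectL, if_pos (by norm_num)]
  norm_num
  rw [if_neg (show ¬((233:Int) < n) by omega)]
  rw [bisectL, if_pos (by norm_num)]
  norm_num
  rw [if_neg (show ¬((162:Int) < n) by omega)]
  rw [bisectL, if_pos (by norm_num)]
  norm_num
  rw [if_pos (show (119:Int) < n by omega)]
  rw [bisectL]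
  rw [if_neg (by norm_num)]

theorem bis_3 (n : Int) (hl : 162 < n) (hu : n ≤ 204) : bisectL cumShlokas n 0 18 18 = 3 := by
  rw [cum_eq]
  rw [bisectL, if_pos (by norm_num)]
  norm_num
  rw [if_neg (show ¬((414:Int) < n) by omega)]
  rw [bisectL, if_pos (by norm_num)]
  norm_num
  rw [if_neg (show ¬((233:Int) < n) by omega)]
  rw [bisectL, if_pos (by norm_num)]
  norm_num
  rw [if_pos (show (162:Int) < n by omega)]
  rw [bisectL, if_pos (by norm_num)]
  norm_num
  rw [if_neg (show ¬((204:Int) < n) by omega)]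
  rw [bisectL]
  rw [if_neg (by norm_num)]

theorem bis_4 (n : Int) (hl : 204 < n) (hu : n ≤ 233) : bisectL cumShlokas n 0 18 18 = 4 := by
  rw [cum_eq]
  rw [bisectL, if_pos (by norm_num)]
  norm_num
  rw [if_neg (show ¬((414:Int) < n) by omega)]
  rw [bisectL, if_pos (by norm_num)]
  norm_num
  rw [if_neg (show ¬((233:Int) < n) by omega)]
  rw [bisectL, if_pos (by norm_num)]
  norm_num
  rw [if_pos (show (162:Int) < n by omega)]
  rw [bisectL, if_pos (by norm_num)]
  norm_num
  rw [if_pos (show (204:Int) < n by omega)]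
  rw [bisectL]
  rw [if_neg (by norm_num)]

theorem bis_5 (n : Int) (hl : 233 < n) (hu : n ≤ 280) : bisectL cumShlokas n 0 18 18 = 5 := by
  rw [cum_eq]
  rw [bisectL, if_pos (by norm_num)]
  norm_num
  rw [if_neg (show ¬((414:Int) < n) by omega)]
  rw [bisectL, if_pos (by norm_num)]
  norm_num
  rw [if_pos (show (233:Int) < n by omega)]
  rw [bisectL, if_pos (by norm_num)]
  norm_num
  rw [if_neg (show ¬((338:Int) < n) by omega)]
  rw [bisectL, if_pos (by norm_num)]
  norm_num
  rw [if_neg (show ¬((310:Int) < n) by omega)]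
  rw [bisectL, if_pos (by norm_num)]
  norm_num
  rw [if_neg (show ¬((280:Int) < n) by omega)]
  rw [bisectL]
  rw [if_neg (by norm_num)]

theorem bis_6 (n : Int) (hl : 280 < n) (hu : n ≤ 310) : bisectL cumShlokas n 0 18 18 = 6 := by
  rw [cum_eq]
  rw [bisectL, if_pos (by norm_num)]
  norm_num
  rw [if_neg (show ¬((414:Int) < n) by omega)]
  rw [bisectL, if_pos (by norm_num)]
  norm_num
  rw [if_pos (show (233:Int) < n by omega)]
  rw [bisectL, if_pos (by norm_num)]
  norm_num
  rw [if_neg (show ¬((338:Int) < n) by omega)]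
  rw [bisectL, if_pos (by norm_num)]
  norm_num
  rw [if_neg (show ¬((310:Int) < n) by omega)]
  rw [bisectL, if_pos (by norm_num)]
  norm_num
  rw [if_pos (show (280:Int) < n by omega)]
  rw [bisectL]
  rw [if_neg (by norm_num)]

theorem bis_7 (n : Int) (hl : 310 < n) (hu : n ≤ 338) : bisectL cumShlokas n 0 18 18 = 7 := by
  rw [cum_eq]
  rw [bisectL, if_pos (by norm_num)]
  norm_num
  rw [if_neg (show ¬((414:Int) < n) by omega)]
  rw [bisectL, if_pos (by norm_num)]
  norm_num
  rw [if_pos (show (233:Int) < n by omega)]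
  rw [bisectL, if_pos (by norm_num)]
  norm_num
  rw [if_neg (show ¬((338:Int) < n) by omega)]
  rw [bisectL, if_pos (by norm_num)]
  norm_num
  rw [if_pos (show (310:Int) < n by omega)]
  rw [bisectL]
  rw [if_neg (by norm_num)]

theorem bis_8 (n : Int) (hl : 338 < n) (hu : n ≤ 372) : bisectL cumShlokas n 0 18 18 = 8 := by
  rw [cum_eq]
  rw [bisectL, if_pos (by norm_num)]
  norm_num
  rw [if_neg (show ¬((414:Int) < n) by omega)]
  rw [bisectL, if_pos (by norm_num)]
  norm_num
  rw [if_pos (show (233:Int) < n by omega)]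
  rw [bisectL, if_pos (by norm_num)]
  norm_num
  rw [if_pos (show (338:Int) < n by omega)]
  rw [bisectL, if_pos (by norm_num)]
  norm_num
  rw [if_neg (show ¬((372:Int) < n) by omega)]
  rw [bisectL]
  rw [if_neg (by norm_num)]

theorem bis_9 (n : Int) (hl : 372 < n) (hu : n ≤ 414) : bisectL cumShlokas n 0 18 18 = 9 := by
  rw [cum_eq]
  rw [bisectL, if_pos (by norm_num)]
  norm_num
  rw [if_neg (show ¬((414:Int) < n) by omega)]
  rw [bisectL, if_pos (by norm_num)]
  norm_num
  rw [if_pos (show (233:Int) < n by omega)]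
  rw [bisectL, if_pos (by norm_num)]
  norm_num
  rw [if_pos (show (338:Int) < n by omega)]
  rw [bisectL, if_pos (by norm_num)]
  norm_num
  rw [if_pos (show (372:Int) < n by omega)]
  rw [bisectL]
  rw [if_neg (by norm_num)]

theorem bis_10 (n : Int) (hl : 414 < n) (hu : n ≤ 469) : bisectL cumShlokas n 0 18 18 = 10 := by
  rw [cum_eq]
  rw [bisectL, if_pos (by norm_num)]
  norm_num
  rw [if_pos (show (414:Int) < n by omega)]
  rw [bisectL, if_pos (by norm_num)]
  norm_num
  rw [if_neg (show ¬((570:Int) < n) by omega)]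
  rw [bisectL, if_pos (by norm_num)]
  norm_num
  rw [if_neg (show ¬((523:Int) < n) by omega)]
  rw [bisectL, if_pos (by norm_num)]
  norm_num
  rw [if_neg (show ¬((489:Int) < n) by omega)]
  rw [bisectL, if_pos (by norm_num)]
  norm_num
  rw [if_neg (show ¬((469:Int) < n) by omega)]
  rw [bisectL]
  rw [if_neg (by norm_num)]

theorem bis_11 (n : Int) (hl : 469 < n) (hu : n ≤ 489) : bisectL cumShlokas n 0 18 18 = 11 := by
  rw [cum_eq]
  rw [bisectL, if_pos (by norm_num)]
  norm_num
  rw [if_pos (show (414:Int) < n by omega)]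
  rw [bisectL, if_pos (by norm_num)]
  norm_num
  rw [if_neg (show ¬((570:Int) < n) by omega)]
  rw [bisectL, if_pos (by norm_num)]
  norm_num
  rw [if_neg (show ¬((523:Int) < n) by omega)]
  rw [bisectL, if_pos (by norm_num)]
  norm_num
  rw [if_neg (show ¬((489:Int) < n) by omega)]
  rw [bisectL, if_pos (by norm_num)]
  norm_num
  rw [if_pos (show (469:Int) < n by omega)]
  rw [bisectL]
  rw [if_neg (by norm_num)]

theorem bis_12 (n : Int) (hl : 489 < n) (hu : n ≤ 523) : bisectL cumShlokas n 0 18 18 = 12 := by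
  rw [cum_eq]
  rw [bisectL, if_pos (by norm_num)]
  norm_num
  rw [if_pos (show (414:Int) < n by omega)]
  rw [bisectL, if_pos (by norm_num)]
  norm_num
  rw [if_neg (show ¬((570:Int) < n) by omega)]
  rw [bisectL, if_pos (by norm_num)]
  norm_num
  rw [if_neg (show ¬((523:Int) < n) by omega)]
  rw [bisectL, if_pos (by norm_num)]
  norm_num
  rw [if_pos (show (489:Int) < n by omega)]
  rw [bisectL]
  rw [if_neg (by norm_num)]

theorem bis_13 (n : Int) (hl : 523 < n) (hu : n ≤ 550) : bisectL cumShlokas n 0 18 18 = 13 := by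
  rw [cum_eq]
  rw [bisectL, if_pos (by norm_num)]
  norm_num
  rw [if_pos (show (414:Int) < n by omega)]
  rw [bisectL, if_pos (by norm_num)]
  norm_num
  rw [if_neg (show ¬((570:Int) < n) by omega)]
  rw [bisectL, if_pos (by norm_num)]
  norm_num
  rw [if_pos (show (523:Int) < n by omega)]
  rw [bisectL, if_pos (by norm_num)]
  norm_num
  rw [if_neg (show ¬((550:Int) < n) by omega)]
  rw [bisectL]
  rw [if_neg (by norm_num)]

theorem bis_14 (n : Int) (hl : 550 < n) (hu : n ≤ 570) : bisectL cumShlokas n 0 18 18 = 14 := by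
  rw [cum_eq]
  rw [bisectL, if_pos (by norm_num)]
  norm_num
  rw [if_pos (show (414:Int) < n by omega)]
  rw [bisectL, if_pos (by norm_num)]
  norm_num
  rw [if_neg (show ¬((570:Int) < n) by omega)]
  rw [bisectL, if_pos (by norm_num)]
  norm_num
  rw [if_pos (show (523:Int) < n by omega)]
  rw [bisectL, if_pos (by norm_num)]
  norm_num
  rw [if_pos (show (550:Int) < n by omega)]
  rw [bisectL]
  rw [if_neg (by norm_num)]

theorem bis_15 (n : Int) (hl : 570 < n) (hu : n ≤ 594) : bisectL cumShlokas n 0 18 18 = 15 := by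
  rw [cum_eq]
  rw [bisectL, if_pos (by norm_num)]
  norm_num
  rw [if_pos (show (414:Int) < n by omega)]
  rw [bisectL, if_pos (by norm_num)]
  norm_num
  rw [if_pos (show (570:Int) < n by omega)]
  rw [bisectL, if_pos (by norm_num)]
  norm_num
  rw [if_neg (show ¬((622:Int) < n) by omega)]
  rw [bisectL, if_pos (by norm_num)]
  norm_num
  rw [if_neg (show ¬((594:Int) < n) by omega)]
  rw [bisectL]
  rw [if_neg (by norm_num)]

theorem bis_16 (n : Int) (hl : 594 < n) (hu : n ≤ 622) : bisectL cumShlokas n 0 18 18 = 16 := by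
  rw [cum_eq]
  rw [bisectL, if_pos (by norm_num)]
  norm_num
  rw [if_pos (show (414:Int) < n by omega)]
  rw [bisectL, if_pos (by norm_num)]
  norm_num
  rw [if_pos (show (570:Int) < n by omega)]
  rw [bisectL, if_pos (by norm_num)]
  norm_num
  rw [if_neg (show ¬((622:Int) < n) by omega)]
  rw [bisectL, if_pos (by norm_num)]
  norm_num
  rw [if_pos (show (594:Int) < n by omega)]
  rw [bisectL]
  rw [if_neg (by norm_num)]

theorem bis_17 (n : Int) (hl : 622 < n) (hu : n ≤ 700) : bisectL cumShlokas n 0 18 18 = 17 := by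
  rw [cum_eq]
  rw [bisectL, if_pos (by norm_num)]
  norm_num
  rw [if_pos (show (414:Int) < n by omega)]
  rw [bisectL, if_pos (by norm_num)]
  norm_num
  rw [if_pos (show (570:Int) < n by omega)]
  rw [bisectL, if_pos (by norm_num)]
  norm_num
  rw [if_pos (show (622:Int) < n by omega)]
  rw [bisectL, if_pos (by norm_num)]
  norm_num
  rw [if_neg (show ¬((700:Int) < n) by omega)]
  rw [bisectL]
  rw [if_neg (by norm_num)]

theorem bis_18 (n : Int) (hl : 700 < n) : bisectL cumShlokas n 0 18 18 = 18 := by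
  rw [cum_eq]
  rw [bisectL, if_pos (by norm_num)]
  norm_num
  rw [if_pos (show (414:Int) < n by omega)]
  rw [bisectL, if_pos (by norm_num)]
  norm_num
  rw [if_pos (show (570:Int) < n by omega)]
  rw [bisectL, if_pos (by norm_num)]
  norm_num
  rw [if_pos (show (622:Int) < n by omega)]
  rw [bisectL, if_pos (by norm_num)]
  norm_num
  rw [if_pos (show (700:Int) < n by omega)]
  rw [bisectL]
  rw [if_neg (by norm_num)]

theorem b_char (n : Int) : getChSh_alt n = caseFn n := by
  simp only [getChSh_alt, caseFn]
  rw [show cumShlokas.length = 18 from rfl]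
  by_cases h0 : n ≤ 47
  · rw [if_pos h0]
    rw [bis_0 n h0]
    norm_num [cum_eq]
  · rw [if_neg h0]
    by_cases h1 : n ≤ 119
    · rw [if_pos h1]
      rw [bis_1 n (by omega) h1]
      norm_num [cum_eq]
    · rw [if_neg h1]
      by_cases h2 : n ≤ 162
      · rw [if_pos h2]
        rw [bis_2 n (by omega) h2]
        norm_num [cum_eq]
      · rw [if_neg h2]
        by_cases h3 : n ≤ 204
        · rw [if_pos h3]
          rw [bis_3 n (by omega) h3]
          norm_num [cum_eq]
        · rw [if_neg h3]
          by_cases h4 : n ≤ 233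
          · rw [if_pos h4]
            rw [bis_4 n (by omega) h4]
            norm_num [cum_eq]
          · rw [if_neg h4]
            by_cases h5 : n ≤ 280
            · rw [if_pos h5]
              rw [bis_5 n (by omega) h5]
              norm_num [cum_eq]
            · rw [if_neg h5]
              by_cases h6 : n ≤ 310
              · rw [if_pos h6]
                rw [bis_6 n (by omega) h6]
                norm_num [cum_eq]
              · rw [if_neg h6]
                by_cases h7 : n ≤ 338
                · rw [if_pos h7]
                  rw [bis_7 n (by omega) h7]
                  norm_num [cum_eq]
                · rw [if_neg h7]
                  by_cases h8 : n ≤ 372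
                  · rw [if_pos h8]
                    rw [bis_8 n (by omega) h8]
                    norm_num [cum_eq]
                  · rw [if_neg h8]
                    by_cases h9 : n ≤ 414
                    · rw [if_pos h9]
                      rw [bis_9 n (by omega) h9]
                      norm_num [cum_eq]
                    · rw [if_neg h9]
                      by_cases h10 : n ≤ 469
                      · rw [if_pos h10]
                        rw [bis_10 n (by omega) h10]
                        norm_num [cum_eq]
                      · rw [if_neg h10]
                        by_cases h11 : n ≤ 489
                        · rw [if_pos h11]
                          rw [bis_11 n (by omega) h11]
                          norm_num [cum_eq]
                        · rw [if_neg h11]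
                          by_cases h12 : n ≤ 523
                          · rw [if_pos h12]
                            rw [bis_12 n (by omega) h12]
                            norm_num [cum_eq]
                          · rw [if_neg h12]
                            by_cases h13 : n ≤ 550
                            · rw [if_pos h13]
                              rw [bis_13 n (by omega) h13]
                              norm_num [cum_eq]
                            · rw [if_neg h13]
                              by_cases h14 : n ≤ 570
                              · rw [if_pos h14]
                                rw [bis_14 n (by omega) h14]
                                norm_num [cum_eq]
                              · rw [if_neg h14]
                                by_cases h15 : n ≤ 594
                                · rw [if_pos h15]
                                  rw [bis_15 n (by omega) h15]
                                  norm_num [cum_eq]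
                                · rw [if_neg h15]
                                  by_cases h16 : n ≤ 622
                                  · rw [if_pos h16]
                                    rw [bis_16 n (by omega) h16]
                                    norm_num [cum_eq]
                                  · rw [if_neg h16]
                                    by_cases h17 : n ≤ 700
                                    · rw [if_pos h17]
                                      rw [bis_17 n (by omega) h17]
                                      norm_num [cum_eq]
                                    · rw [if_neg h17]
                                      rw [bis_18 n (by omega)]
                                      norm_num [cum_eq]

-- ===== VERDICT (by name: the statement is the Claim_ definition above) =====
theorem getChSh_spec : Claim_equal_getChSh := by
  intro n _
  unfold Spec_getChSh
  rw [a_char, b_char]
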